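-- pv_equiv track=rewrite | github.com/josebummer/ugr_programacion_tecnica_y_cientifica | Relacion Listas/ej4.py | numerosPares
-- ===== SOURCE A (Python) =====
-- def numerosPares(numeros):
--     pares = 0
--     suma = 0
--
--     for n in numeros:
--         if n%2 == 0:
--             pares += 1
--             suma += n
--
--     return pares,suma
-- ===== SOURCE B (Python) =====
-- def numerosPares(numeros):
--     # divide and conquer: split the list in halves, combine (count, sum) pairs
--     if len(numeros) == 0:
--         return (0, 0)
--     if len(numeros) == 1:
--         n = numeros[0]
--         return (1, n) if n % 2 == 0 else (0, 0)
--     mid = len(numeros) // 2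
--     c1, s1 = numerosPares(numeros[:mid])
--     c2, s2 = numerosPares(numeros[mid:])
--     return (c1 + c2, s1 + s2)
-- ===== Notes on version B (the rewrite author's own statement) =====
-- stated objective: alternative
-- what changed: B computes (count, sum) of the evens by divide and conquer, recursively splitting the list in halves and adding the pairs, instead of A's single left-to-right accumulating loop.
import Mathlib
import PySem

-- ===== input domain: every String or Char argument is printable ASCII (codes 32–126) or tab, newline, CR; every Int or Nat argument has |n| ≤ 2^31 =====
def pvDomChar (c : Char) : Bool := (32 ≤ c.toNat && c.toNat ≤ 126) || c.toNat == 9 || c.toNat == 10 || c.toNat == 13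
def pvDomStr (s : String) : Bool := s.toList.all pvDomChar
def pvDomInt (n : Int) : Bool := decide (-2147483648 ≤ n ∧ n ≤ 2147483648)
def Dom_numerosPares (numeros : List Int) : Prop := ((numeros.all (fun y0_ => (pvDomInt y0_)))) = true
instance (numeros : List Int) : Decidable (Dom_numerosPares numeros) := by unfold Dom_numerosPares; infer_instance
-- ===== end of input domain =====

-- B computes (count, sum) of the evens by divide and conquer on list halves instead of A's single accumulating loop; objective: alternative.


-- ===== PORT A =====
-- A: one loop accumulating count and sum of even elements
def numerosPares (numeros : List Int) : Int × Int :=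
  numeros.foldl (fun st n =>
    if PySem.Int.mod n 2 = 0 then (st.1 + 1, st.2 + n) else st) (0, 0)

-- ===== PORT B =====
-- B: divide and conquer — split in halves at mid = len // 2, combine the pairs.
-- 'len(numeros) // 2' is Nat division here (exact: the length is nonnegative);
-- 'numeros[0]' is in range in its branch (length = 1), so pyGet? … getD 0 is exact.
def numerosPares_alt (numeros : List Int) : Int × Int :=
  if numeros.length = 0 then (0, 0)
  else if numeros.length = 1 then
    let n := (PySem.List.pyGet? numeros 0).getD 0
    if PySem.Int.mod n 2 = 0 then (1, n) else (0, 0)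
  else
    let mid := numeros.length / 2
    let p1 := numerosPares_alt (PySem.List.slice numeros none (some (mid : Int)))
    let p2 := numerosPares_alt (PySem.List.slice numeros (some (mid : Int)) none)
    (p1.1 + p2.1, p1.2 + p2.2)
termination_by numeros.length
decreasing_by
  · rw [PySem.List.slice_to_natCast]; simp only [List.length_take]; omega
  · rw [PySem.List.slice_from_natCast]; simp only [List.length_drop]; omega

-- ===== PRECONDITION & SPEC =====
def Spec_numerosPares (numeros : List Int) (out : Int × Int) : Prop := out = numerosPares_alt numeros
instance (numeros : List Int) (out : Int × Int) : Decidable (Spec_numerosPares numeros out) := by unfold Spec_numerosPares; infer_instance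

-- ===== CLAIM (what is proved, stated in full; the proofs are below) =====
def Claim_equal_numerosPares : Prop := ∀ (numeros : List Int), Dom_numerosPares numeros → Spec_numerosPares numeros (numerosPares numeros)

-- ===== LEMMAS AND PROOFS =====

-- A's fold computes (count, sum) of the even elements
lemma numerosPares_foldl (numeros : List Int) (p s : Int) :
    numeros.foldl (fun st n =>
      if PySem.Int.mod n 2 = 0 then (st.1 + 1, st.2 + n) else st) (p, s)
      = (p + ((numeros.filter (fun n => PySem.Int.mod n 2 = 0)).length : Int),
         s + (numeros.filter (fun n => PySem.Int.mod n 2 = 0)).sum) := by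
  induction numeros generalizing p s with
  | nil => simp
  | cons x xs ih =>
    simp only [List.foldl_cons, List.filter_cons]
    by_cases h : PySem.Int.mod x 2 = 0 <;>
      simp only [h, if_true, if_false, decide_true, decide_false, ih,
        List.length_cons, List.sum_cons, Prod.mk.injEq] <;>
      push_cast <;> constructor <;> ring

-- B's divide and conquer computes the same (count, sum) of the even elements
lemma numerosPares_alt_eq (numeros : List Int) :
    numerosPares_alt numeros
      = (((numeros.filter (fun n => PySem.Int.mod n 2 = 0)).length : Int),
         (numeros.filter (fun n => PySem.Int.mod n 2 = 0)).sum) := by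
  induction numeros using numerosPares_alt.induct with
  | case1 xs h =>
    rw [numerosPares_alt]
    simp_all [List.length_eq_zero_iff]
  | case2 xs h0 h1 hmod =>
    obtain ⟨n, rfl⟩ := List.length_eq_one_iff.mp h1
    rw [numerosPares_alt]
    simp only [PySem.List.pyGet?, PySem.List.pyIdx?, List.filter_cons]
    split_ifs <;> simp_all [PySem.Int.mod]
  | case3 xs h0 h1 hmod =>
    obtain ⟨n, rfl⟩ := List.length_eq_one_iff.mp h1
    rw [numerosPares_alt]
    simp only [PySem.List.pyGet?, PySem.List.pyIdx?, List.filter_cons]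
    split_ifs <;> simp_all [PySem.Int.mod]
  | case4 xs h0 h1 mid ihA ihB =>
    rw [numerosPares_alt]
    simp only [h0, h1, if_false, PySem.List.slice_to_natCast, PySem.List.slice_from_natCast]
    rw [PySem.List.slice_to_natCast] at ihA
    rw [PySem.List.slice_from_natCast] at ihB
    rw [ihA, ihB]
    conv_rhs => rw [← List.take_append_drop (xs.length / 2) xs]
    simp only [List.filter_append, List.length_append, List.sum_append, Prod.ext_iff]
    push_cast
    constructor <;> ring

-- ===== VERDICT (by name: the statement is the Claim_ definition above) =====
theorem numerosPares_spec : Claim_equal_numerosPares := by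
  intro numeros _
  unfold Spec_numerosPares numerosPares
  rw [numerosPares_foldl, numerosPares_alt_eq]
  simp
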